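-- pv_equiv track=rewrite | github.com/ash0814/Al-th | dason/stack_queue/02_기능개발.py | solution
-- ===== SOURCE A (Python) =====
-- def solution(progresses, speeds):
--     result = []
--     while progresses:
--         count = 0
--         for index in range(len(progresses)):
--             progresses[index] += speeds[index]
--         if progresses[0] >= 100:
--             for index in range(len(progresses)):
--                 if progresses[index] >= 100:
--                     count += 1
--                 else:
--                     break
--             result.append(count)
--             del progresses[:count]
--             del speeds[:count]
--     return result
-- ===== SOURCE B (Python) =====
-- def solution(progresses, speeds):
--     # B: compute each task's completion day in closed form (ceil division),
--     # then group by each group's leader day with a two-index scan.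
--     # Note: A mutates progresses/speeds in place (del); B does not (return value equivalence only).
--     days = [max(1, -((p - 100) // s)) for p, s in zip(progresses, speeds)]
--     result = []
--     i, n = 0, len(days)
--     while i < n:
--         j = i + 1
--         while j < n and days[j] <= days[i]:
--             j += 1
--         result.append(j - i)
--         i = j
--     return result
-- ===== Notes on version B (the rewrite author's own statement) =====
-- stated objective: alternative
-- what changed: B replaces A's day-by-day simulation (incrementing every task each day until the front batch completes) by a closed-form ceiling-division completion day per task followed by a single linear grouping scan over those days (intended as faster; a timing run could not measure a ratio because A timed out at n=16 where B returned).
-- outside the precondition, e.g. on solution([200], [0]): A returns [1], B raises ZeroDivisionError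
import Mathlib
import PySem

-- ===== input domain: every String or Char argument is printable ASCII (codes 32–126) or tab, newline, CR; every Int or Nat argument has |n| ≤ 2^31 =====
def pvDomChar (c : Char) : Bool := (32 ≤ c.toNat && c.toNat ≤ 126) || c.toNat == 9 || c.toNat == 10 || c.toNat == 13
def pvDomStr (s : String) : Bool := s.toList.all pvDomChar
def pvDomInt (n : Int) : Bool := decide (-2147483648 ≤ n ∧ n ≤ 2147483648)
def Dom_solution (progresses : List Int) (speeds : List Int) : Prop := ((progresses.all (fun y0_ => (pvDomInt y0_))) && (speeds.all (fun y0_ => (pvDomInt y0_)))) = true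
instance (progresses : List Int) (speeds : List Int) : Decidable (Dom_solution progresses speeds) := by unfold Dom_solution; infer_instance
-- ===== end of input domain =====

-- B replaces A's day-by-day simulation by closed-form completion days plus one grouping scan;
-- A mutates its arguments in place (del progresses[:count], del speeds[:count]) — equivalence here is about the RETURN value only.

-- ===== PORT A =====
-- A's while loop: each iteration adds one day's speed to every task, and when the front task
-- is done pops the completed prefix. The loop is not structurally recursive, so it carries fuel;
-- under Pre_ (relevant speeds positive) and Dom (|ints| ≤ 2^31) at most 2^31+100 < 2^32
-- iterations happen, so fuel 2^32 never runs out there (proved in the lemmas below).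
def aLoop (fuel : Nat) (ps ss res : List Int) : List Int :=
  match ps with
  | [] => res                                -- while progresses: exits
  | _ :: _ =>
    match fuel with
    | 0 => res                               -- fuel exhausted: unreachable under Dom ∧ Pre_
    | fuel + 1 =>
      let ps' := List.zipWith (· + ·) ps ss  -- progresses[i] += speeds[i]
      match ps' with
      | [] => res                            -- speeds = []: Python raises IndexError (outside Pre_)
      | q :: _ =>
        if 100 ≤ q then                      -- progresses[0] >= 100
          let count := (ps'.takeWhile (fun x => decide (100 ≤ x))).length  -- inner for with break
          aLoop fuel (ps'.drop count) (ss.drop count) (res ++ [(count : Int)])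
        else
          aLoop fuel ps' ss res

def solution (progresses : List Int) (speeds : List Int) : List Int :=
  aLoop 4294967296 progresses speeds []

-- ===== PORT B =====
-- d = max(1, -((p - 100) // s)): the completion day of a task, Python floor division
def pvDay (p s : Int) : Int := max 1 (-(PySem.Int.floordiv (p - 100) s))

-- the outer while i < n loop of Source B; the inner `while j < n and days[j] <= days[i]` scan is the
-- takeWhile over the tail, j - i = k + 1
def altGroup : List Int → List Int
  | [] => []
  | d :: rest =>
    let k := (rest.takeWhile (fun x => decide (x ≤ d))).length
    ((k : Int) + 1) :: altGroup (rest.drop k)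
  termination_by l => l.length
  decreasing_by simp [List.length_drop]

def solution_alt (progresses : List Int) (speeds : List Int) : List Int :=
  altGroup ((progresses.zip speeds).map (fun pq => pvDay pq.1 pq.2))

-- ===== PRECONDITION & SPEC =====
-- Pre_ excludes inputs where Python A raises IndexError (fewer speeds than progresses) or where a
-- task's speed is ≤ 0, on which A loops forever for typical inputs (and, when such a task starts
-- at ≥ 100, A still returns while B's ceiling division divides by zero — see the cite).
def Pre_solution (progresses : List Int) (speeds : List Int) : Prop :=
  progresses.length ≤ speeds.length ∧ ∀ s ∈ speeds.take progresses.length, 0 < s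
instance (progresses : List Int) (speeds : List Int) : Decidable (Pre_solution progresses speeds) := by unfold Pre_solution; infer_instance
def pvWitness_solution : List Int × List Int := ([30, 99, 95], [30, 1, 5])
def Spec_solution (progresses : List Int) (speeds : List Int) (out : List Int) : Prop := out = solution_alt progresses speeds
instance (progresses : List Int) (speeds : List Int) (out : List Int) : Decidable (Spec_solution progresses speeds out) := by unfold Spec_solution; infer_instance

-- ===== CLAIM (what is proved, stated in full; the proofs are below) =====
def Claim_equal_solution : Prop := ∀ (progresses : List Int) (speeds : List Int), Dom_solution progresses speeds → Pre_solution progresses speeds → Spec_solution progresses speeds (solution progresses speeds)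

-- ===== LEMMAS AND PROOFS =====

lemma altGroup_nil : altGroup [] = [] := by rw [altGroup]

lemma altGroup_cons (d : Int) (rest : List Int) :
    altGroup (d :: rest) = (((rest.takeWhile (fun x => decide (x ≤ d))).length : Int) + 1)
      :: altGroup (rest.drop (rest.takeWhile (fun x => decide (x ≤ d))).length) := by
  rw [altGroup]

lemma pvDay_one_le (p s : Int) : 1 ≤ pvDay p s := le_max_left _ _

-- pvDay is the least day u ≥ 1 on which p + u*s has reached 100 (for a positive speed)
lemma pvDay_le_iff (p s u : Int) (hs : 0 < s) (hu : 1 ≤ u) :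
    pvDay p s ≤ u ↔ 100 ≤ p + u * s := by
  unfold pvDay
  rw [PySem.Int.floordiv_eq_ediv_of_pos hs, max_le_iff]
  have h2 : -u ≤ (p - 100) / s ↔ -u * s ≤ p - 100 := Int.le_ediv_iff_mul_le hs
  constructor
  · intro h
    have := h.2
    have : -u ≤ (p - 100) / s := by omega
    have := h2.mp this
    nlinarith
  · intro h
    refine ⟨hu, ?_⟩
    have : -u * s ≤ p - 100 := by nlinarith
    have := h2.mpr this
    omega

lemma pvDay_le_bound (p s : Int) (hs : 0 < s) (hp : -2147483648 ≤ p) :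
    pvDay p s ≤ 4294967296 := by
  rw [pvDay_le_iff p s _ hs (by norm_num)]
  nlinarith

-- one day's increment, in terms of the original (progress, speed) pairs at elapsed time t
lemma zip_shift (l : List (Int × Int)) (extra : List Int) (t : Int) :
    List.zipWith (· + ·) (l.map (fun pq => pq.1 + t * pq.2)) (l.map Prod.snd ++ extra)
      = l.map (fun pq => pq.1 + (t + 1) * pq.2) := by
  induction l with
  | nil => simp
  | cons a l ih => simp [ih]; ring

lemma takeWhile_congr_mem {α : Type} (l : List α) (p q : α → Bool)
    (h : ∀ a ∈ l, p a = q a) : l.takeWhile p = l.takeWhile q := by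
  induction l with
  | nil => rfl
  | cons a l ih =>
    have ha := h a (by simp)
    by_cases hp : p a
    · rw [List.takeWhile_cons_of_pos hp, List.takeWhile_cons_of_pos (ha ▸ hp),
        ih (fun b hb => h b (by simp [hb]))]
    · rw [List.takeWhile_cons_of_neg hp, List.takeWhile_cons_of_neg (ha ▸ hp)]

lemma drop_takeWhile_eq_dropWhile {α : Type} (l : List α) (p : α → Bool) :
    l.drop (l.takeWhile p).length = l.dropWhile p := by
  induction l with
  | nil => simp
  | cons a l ih => by_cases hp : p a <;> simp [hp, ih]

lemma head_dropWhile_false {α : Type} (l : List α) (p : α → Bool) (x : α)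
    (h : x ∈ (l.dropWhile p).head?) : p x = false := by
  induction l with
  | nil => simp at h
  | cons a l ih =>
    by_cases hp : p a
    · simp [hp] at h ⊢; exact ih h
    · simp [hp] at h; subst h; simpa using hp

lemma aLoop_cons (fuel : Nat) (p : Int) (ps ss res : List Int) :
    aLoop (fuel + 1) (p :: ps) ss res = (
      let ps' := List.zipWith (· + ·) (p :: ps) ss
      match ps' with
      | [] => res
      | q :: _ =>
        if 100 ≤ q then
          let count := (ps'.takeWhile (fun x => decide (100 ≤ x))).length
          aLoop fuel (ps'.drop count) (ss.drop count) (res ++ [(count : Int)])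
        else aLoop fuel ps' ss res) := by
  rw [aLoop]

-- the main simulation invariant: after t elapsed days (t below the front task's completion day),
-- A's remaining loop produces exactly B's grouping of the remaining tasks' completion days
lemma loop_eq (fuel : Nat) :
    ∀ (pairs : List (Int × Int)) (extra : List Int) (t : Int) (res : List Int),
    (∀ pq ∈ pairs, 0 < pq.2) →
    0 ≤ t →
    (∀ pq ∈ pairs.head?, t < pvDay pq.1 pq.2) →
    (∀ pq ∈ pairs, pvDay pq.1 pq.2 ≤ t + fuel) →
    aLoop fuel (pairs.map (fun pq => pq.1 + t * pq.2)) (pairs.map Prod.snd ++ extra) res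
      = res ++ altGroup (pairs.map (fun pq => pvDay pq.1 pq.2)) := by
  induction fuel with
  | zero =>
    intro pairs extra t res hpos ht hhead hfuel
    cases pairs with
    | nil => simp [aLoop, altGroup_nil]
    | cons pq rest =>
      exfalso
      have h1 := hhead pq (by simp)
      have h2 := hfuel pq (by simp)
      omega
  | succ fuel ih =>
    intro pairs extra t res hpos ht hhead hfuel
    cases pairs with
    | nil => simp [aLoop, altGroup_nil]
    | cons pq rest =>
      have hs0 : 0 < pq.2 := hpos pq (by simp)
      have hd0 : t < pvDay pq.1 pq.2 := by simpa using hhead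
      have hz := zip_shift (pq :: rest) extra t
      simp only [List.map_cons, List.cons_append] at hz ⊢
      rw [aLoop_cons]
      simp only []
      rw [hz]
      dsimp only
      have ht1 : (1:Int) ≤ t + 1 := by omega
      by_cases hq : (100:Int) ≤ pq.1 + (t + 1) * pq.2
      · -- the front task completes on day t+1: pop the completed prefix
        have hdeq : pvDay pq.1 pq.2 = t + 1 :=
          le_antisymm ((pvDay_le_iff _ _ _ hs0 ht1).mpr hq) (by omega)
        have hP : ∀ pq' ∈ rest,
            ((fun x => decide ((100:Int) ≤ x)) ∘ (fun pq' : Int × Int => pq'.1 + (t+1)*pq'.2)) pq'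
              = (fun pq' : Int × Int => decide (pvDay pq'.1 pq'.2 ≤ t + 1)) pq' := by
          intro pq' h'
          simp only [Function.comp]
          rw [decide_eq_decide]
          exact (pvDay_le_iff _ _ _ (hpos pq' (by simp [h'])) ht1).symm
        have htw : (List.map (fun pq => pq.1 + (t + 1) * pq.2) rest).takeWhile (fun x => decide (100 ≤ x))
            = (rest.takeWhile (fun pq' : Int × Int => decide (pvDay pq'.1 pq'.2 ≤ t + 1))).map
                (fun pq => pq.1 + (t + 1) * pq.2) := by
          rw [List.takeWhile_map, takeWhile_congr_mem _ _ _ hP]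
        have hKle : (rest.takeWhile (fun pq' : Int × Int => decide (pvDay pq'.1 pq'.2 ≤ t + 1))).length ≤ rest.length :=
          (rest.takeWhile_sublist (fun pq' : Int × Int => decide (pvDay pq'.1 pq'.2 ≤ t + 1))).length_le
        rw [if_pos hq]
        have htwc : List.takeWhile (fun x => decide ((100:Int) ≤ x))
            ((pq.1 + (t + 1) * pq.2) :: List.map (fun pq => pq.1 + (t + 1) * pq.2) rest)
            = (pq.1 + (t + 1) * pq.2) :: (rest.takeWhile (fun pq' : Int × Int => decide (pvDay pq'.1 pq'.2 ≤ t + 1))).map (fun pq => pq.1 + (t + 1) * pq.2) := by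
          rw [List.takeWhile_cons_of_pos (by simpa using hq), htw]
        rw [htwc]
        simp only [List.length_cons, List.length_map, List.drop_succ_cons]
        rw [altGroup_cons, hdeq]
        have htw2 : (List.map (fun pq => pvDay pq.1 pq.2) rest).takeWhile (fun x => decide (x ≤ t + 1))
            = (rest.takeWhile (fun pq' : Int × Int => decide (pvDay pq'.1 pq'.2 ≤ t + 1))).map (fun pq => pvDay pq.1 pq.2) := by
          rw [List.takeWhile_map]
          simp [Function.comp_def]
        rw [htw2]
        simp only [List.length_map]
        have hdropP : rest.drop (rest.takeWhile (fun pq' : Int × Int => decide (pvDay pq'.1 pq'.2 ≤ t + 1))).length = rest.dropWhile (fun pq' : Int × Int => decide (pvDay pq'.1 pq'.2 ≤ t + 1)) :=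
          drop_takeWhile_eq_dropWhile rest (fun pq' : Int × Int => decide (pvDay pq'.1 pq'.2 ≤ t + 1))
        have hdmap : ∀ f : Int × Int → Int,
            List.drop (rest.takeWhile (fun pq' : Int × Int => decide (pvDay pq'.1 pq'.2 ≤ t + 1))).length (rest.map f)
              = (rest.drop (rest.takeWhile (fun pq' : Int × Int => decide (pvDay pq'.1 pq'.2 ≤ t + 1))).length).map f := by
          intro f; rw [← List.map_drop]
        have hdsnd : List.drop (rest.takeWhile (fun pq' : Int × Int => decide (pvDay pq'.1 pq'.2 ≤ t + 1))).length (rest.map Prod.snd ++ extra)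
            = (rest.drop (rest.takeWhile (fun pq' : Int × Int => decide (pvDay pq'.1 pq'.2 ≤ t + 1))).length).map Prod.snd ++ extra := by
          rw [List.drop_append_of_le_length (by simpa using hKle), ← List.map_drop]
        rw [hdmap, hdmap, hdsnd]
        have happ := ih (rest.drop (rest.takeWhile (fun pq' : Int × Int => decide (pvDay pq'.1 pq'.2 ≤ t + 1))).length) extra (t + 1)
            (res ++ [(((rest.takeWhile (fun pq' : Int × Int => decide (pvDay pq'.1 pq'.2 ≤ t + 1))).length + 1 : Nat) : Int)])
            (fun x hx => hpos x (List.mem_cons_of_mem _ (List.mem_of_mem_drop hx)))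
            (by omega)
            (by
              rw [hdropP]
              intro x hx
              have hfalse := head_dropWhile_false rest (fun pq' : Int × Int => decide (pvDay pq'.1 pq'.2 ≤ t + 1)) x hx
              simp only [decide_eq_false_iff_not, not_le] at hfalse
              omega)
            (by
              intro x hx
              have := hfuel x (List.mem_cons_of_mem _ (List.mem_of_mem_drop hx))
              push_cast at this ⊢
              omega)
        rw [happ]
        simp only [List.append_assoc, List.singleton_append]
        norm_cast
      · -- nothing completes yet: one more day elapses
        have hd1 : t + 1 < pvDay pq.1 pq.2 := by
          by_contra hc; push Not at hc
          exact hq ((pvDay_le_iff _ _ _ hs0 ht1).mp hc)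
        rw [if_neg hq]
        have happ := ih (pq :: rest) extra (t + 1) res hpos (by omega)
          (by intro x hx; simp at hx; subst hx; exact hd1)
          (by intro x hx; have := hfuel x hx; push_cast at this ⊢; omega)
        simpa [List.map_cons, List.cons_append] using happ

lemma map_snd_zip_take (l₁ l₂ : List Int) (h : l₁.length ≤ l₂.length) :
    (l₁.zip l₂).map Prod.snd = l₂.take l₁.length := by
  induction l₁ generalizing l₂ with
  | nil => simp
  | cons a l ih =>
    cases l₂ with
    | nil => simp at h
    | cons b l₂ => simp_all

theorem solution_eq_alt (progresses speeds : List Int)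
    (hdom : Dom_solution progresses speeds) (hpre : Pre_solution progresses speeds) :
    solution progresses speeds = solution_alt progresses speeds := by
  obtain ⟨hlen, hsp⟩ := hpre
  have hpos : ∀ pq ∈ progresses.zip speeds, 0 < pq.2 := by
    intro pq hpq
    apply hsp
    have h2 : pq.2 ∈ (progresses.zip speeds).map Prod.snd := List.mem_map_of_mem hpq
    rwa [map_snd_zip_take _ _ hlen] at h2
  have hlow : ∀ pq ∈ progresses.zip speeds, -2147483648 ≤ pq.1 := by
    intro pq hpq
    have h1 : pq.1 ∈ progresses := by
      have h2 : pq.1 ∈ (progresses.zip speeds).map Prod.fst := List.mem_map_of_mem hpq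
      rwa [List.map_fst_zip hlen] at h2
    simp only [Dom_solution, Bool.and_eq_true, List.all_eq_true, pvDomInt,
      decide_eq_true_eq] at hdom
    exact (hdom.1 pq.1 h1).1
  have hmain := loop_eq 4294967296 (progresses.zip speeds) (speeds.drop progresses.length) 0 []
    hpos le_rfl
    (by intro x hx; have := pvDay_one_le x.1 x.2; omega)
    (by
      intro x hx
      have := pvDay_le_bound x.1 x.2 (hpos x hx) (hlow x hx)
      push_cast
      omega)
  have hfst : (progresses.zip speeds).map (fun pq => pq.1 + 0 * pq.2) = progresses := by
    simp only [zero_mul, add_zero]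
    exact List.map_fst_zip hlen
  have hsnd : (progresses.zip speeds).map Prod.snd ++ speeds.drop progresses.length = speeds := by
    rw [map_snd_zip_take _ _ hlen, List.take_append_drop]
  rw [hfst, hsnd] at hmain
  unfold solution solution_alt
  simpa using hmain

-- ===== VERDICT (by name: the statement is the Claim_ definition above) =====
theorem solution_spec : Claim_equal_solution := by
  intro progresses speeds hdom hpre
  exact solution_eq_alt progresses speeds hdom hpre
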